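-- pv_equiv track=rewrite | github.com/otzgary/youtube-kb | extract.py | merge_into_paragraphs
-- ===== SOURCE A (Python) =====
-- def merge_into_paragraphs(lines, sentences_per_paragraph=5):
--     """将字幕行合并成段落，提高可读性"""
--     if not lines:
--         return ""
--
--     paragraphs = []
--     current = []
--
--     for line in lines:
--         current.append(line)
--         ends_sentence = line.endswith(("。", ".", "！", "!", "？", "?"))
--         if ends_sentence and len(current) >= sentences_per_paragraph:
--             paragraphs.append(" ".join(current))
--             current = []
--
--     if current:
--         paragraphs.append(" ".join(current))
--
--     return "\n\n".join(paragraphs)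
-- ===== SOURCE B (Python) =====
-- ENDERS = ("。", ".", "！", "!", "？", "?")
--
--
-- def merge_into_paragraphs(lines, sentences_per_paragraph=5):
--     """Cut the line list into paragraph slices greedily, then join each slice."""
--     if not lines:
--         return ""
--     paragraphs = []
--     rest = lines
--     while rest:
--         k = 0
--         count = 0
--         for line in rest:
--             count += 1
--             if line.endswith(ENDERS) and count >= sentences_per_paragraph:
--                 break
--             k += 1
--         cut = min(k + 1, len(rest))
--         paragraphs.append(" ".join(rest[:cut]))
--         rest = rest[cut:]
--     return "\n\n".join(paragraphs)
-- ===== Notes on version B (the rewrite author's own statement) =====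
-- stated objective: alternative
-- what changed: A folds once over the lines maintaining a mutable current-paragraph buffer and a growing paragraph list; B instead repeatedly scans for the next greedy cut point and slices the remaining lines into a paragraph, so paragraphs are produced by slicing rather than by accumulating a buffer.
import Mathlib
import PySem

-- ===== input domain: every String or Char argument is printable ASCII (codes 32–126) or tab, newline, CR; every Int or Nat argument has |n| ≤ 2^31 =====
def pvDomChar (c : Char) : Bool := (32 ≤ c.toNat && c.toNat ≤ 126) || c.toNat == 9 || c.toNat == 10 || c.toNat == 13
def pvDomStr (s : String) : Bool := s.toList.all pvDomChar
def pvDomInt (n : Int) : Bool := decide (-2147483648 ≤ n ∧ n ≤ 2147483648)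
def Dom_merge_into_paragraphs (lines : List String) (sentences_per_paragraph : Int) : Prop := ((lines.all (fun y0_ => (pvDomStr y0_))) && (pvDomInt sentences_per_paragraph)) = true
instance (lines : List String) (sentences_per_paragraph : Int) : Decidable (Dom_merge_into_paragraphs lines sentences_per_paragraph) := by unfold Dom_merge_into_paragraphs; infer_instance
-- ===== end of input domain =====

-- B replaces A's single fold with a mutable current-paragraph buffer by a greedy
-- cut-point scan that slices the remaining lines into paragraphs (objective: alternative).

-- shared helper: line.endswith(("。", ".", "！", "!", "？", "?"))
def pvEndsSentence (line : String) : Bool :=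
  PySem.Str.endswith line "。" || PySem.Str.endswith line "." ||
  PySem.Str.endswith line "！" || PySem.Str.endswith line "!" ||
  PySem.Str.endswith line "？" || PySem.Str.endswith line "?"

-- ===== PORT A =====
def merge_into_paragraphs (lines : List String) (sentences_per_paragraph : Int) : String :=
  if lines = [] then "" else
  let st := lines.foldl (fun (st : List String × List String) line =>
      let current := st.2 ++ [line]
      if pvEndsSentence line && decide ((current.length : Int) ≥ sentences_per_paragraph) then
        (st.1 ++ [PySem.Str.join " " current], ([] : List String))
      else (st.1, current)) ([], [])
  let paragraphs := if st.2 ≠ [] then st.1 ++ [PySem.Str.join " " st.2] else st.1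
  PySem.Str.join "\n\n" paragraphs

-- ===== PORT B =====
-- inner for-loop of Source B: index k of the first greedy cut line (rest.length if none)
def pvFindCut (rest : List String) (sentences_per_paragraph : Int) (count : Int) : Nat :=
  match rest with
  | [] => 0
  | l :: ls =>
    if pvEndsSentence l && decide (count + 1 ≥ sentences_per_paragraph) then 0
    else 1 + pvFindCut ls sentences_per_paragraph (count + 1)

-- outer while-loop of Source B: slice off one paragraph per step
def pvParasB (rest : List String) (sentences_per_paragraph : Int) : List String :=
  match rest with
  | [] => []
  | l :: ls =>
    let cut := min (pvFindCut (l :: ls) sentences_per_paragraph 0 + 1) (l :: ls).length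
    PySem.Str.join " " ((l :: ls).take cut) :: pvParasB ((l :: ls).drop cut) sentences_per_paragraph
termination_by rest.length
decreasing_by simp

def merge_into_paragraphs_alt (lines : List String) (sentences_per_paragraph : Int) : String :=
  if lines = [] then "" else
  PySem.Str.join "\n\n" (pvParasB lines sentences_per_paragraph)

-- ===== PRECONDITION & SPEC =====
def Spec_merge_into_paragraphs (lines : List String) (sentences_per_paragraph : Int) (out : String) : Prop := out = merge_into_paragraphs_alt lines sentences_per_paragraph
instance (lines : List String) (sentences_per_paragraph : Int) (out : String) : Decidable (Spec_merge_into_paragraphs lines sentences_per_paragraph out) := by unfold Spec_merge_into_paragraphs; infer_instance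

-- ===== CLAIM (what is proved, stated in full; the proofs are below) =====
def Claim_equal_merge_into_paragraphs : Prop := ∀ (lines : List String) (sentences_per_paragraph : Int), Dom_merge_into_paragraphs lines sentences_per_paragraph → Spec_merge_into_paragraphs lines sentences_per_paragraph (merge_into_paragraphs lines sentences_per_paragraph)

-- ===== LEMMAS AND PROOFS =====

-- A's loop recast as structural recursion (proof helper only)
def pvFinA (spp : Int) : List String → List String → List String
  | [], cur => if cur = [] then [] else [PySem.Str.join " " cur]
  | l :: ls, cur =>
    let current := cur ++ [l]
    if pvEndsSentence l && decide ((current.length : Int) ≥ spp) then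
      PySem.Str.join " " current :: pvFinA spp ls []
    else pvFinA spp ls current

lemma pvParasB_nil (spp : Int) : pvParasB [] spp = [] := by
  rw [pvParasB]

lemma pvParasB_cons (l : String) (ls : List String) (spp : Int) :
    pvParasB (l :: ls) spp =
      PySem.Str.join " " ((l :: ls).take (min (pvFindCut (l :: ls) spp 0 + 1) (l :: ls).length))
        :: pvParasB ((l :: ls).drop (min (pvFindCut (l :: ls) spp 0 + 1) (l :: ls).length)) spp := by
  rw [pvParasB]

lemma pvFoldA_eq_finA (spp : Int) : ∀ (ls : List String) (paras cur : List String),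
    (let st := ls.foldl (fun (st : List String × List String) line =>
        let current := st.2 ++ [line]
        if pvEndsSentence line && decide ((current.length : Int) ≥ spp) then
          (st.1 ++ [PySem.Str.join " " current], ([] : List String))
        else (st.1, current)) (paras, cur)
     if st.2 ≠ [] then st.1 ++ [PySem.Str.join " " st.2] else st.1)
    = paras ++ pvFinA spp ls cur := by
  intro ls
  induction ls with
  | nil =>
    intro paras cur
    simp only [List.foldl_nil, pvFinA]
    split_ifs with h h2 <;> simp_all
  | cons l rest ih =>
    intro paras cur
    simp only [List.foldl_cons, pvFinA]
    by_cases h : (pvEndsSentence l && decide (((cur ++ [l]).length : Int) ≥ spp)) = true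
    · simp only [h, if_true]
      rw [ih]
      simp
    · simp only [h]
      simp only [Bool.false_eq_true, if_false]
      rw [ih]

lemma pvFinA_eq_parasB (spp : Int) : ∀ (ls cur : List String), ls ≠ [] →
    pvFinA spp ls cur =
      PySem.Str.join " " (cur ++ ls.take (min (pvFindCut ls spp (cur.length : Int) + 1) ls.length))
        :: pvParasB (ls.drop (min (pvFindCut ls spp (cur.length : Int) + 1) ls.length)) spp := by
  intro ls
  induction ls with
  | nil => intro cur h; exact absurd rfl h
  | cons l rest ih =>
    intro cur _
    have hcast : (((cur ++ [l]).length : Nat) : Int) = (cur.length : Int) + 1 := by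
      simp
    by_cases hc : (pvEndsSentence l && decide ((cur.length : Int) + 1 ≥ spp)) = true
    · -- cut fires at l
      have hcond : (pvEndsSentence l && decide ((((cur ++ [l]).length : Nat) : Int) ≥ spp)) = true := by
        rw [hcast]; exact hc
      have hfc : pvFindCut (l :: rest) spp (cur.length : Int) = 0 := by
        simp only [pvFindCut, hc, if_true]
      simp only [pvFinA, hcond, if_true, hfc]
      have hmin : min (0 + 1) (l :: rest).length = 1 := by simp
      rw [hmin]
      simp only [List.take_succ_cons, List.take_zero, List.drop_succ_cons, List.drop_zero]
      congr 1
      -- pvFinA spp rest [] = pvParasB rest spp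
      cases rest with
      | nil => simp [pvFinA, pvParasB_nil]
      | cons r rs =>
        rw [ih [] (by simp)]
        rw [pvParasB_cons]
        simp
    · -- no cut at l
      have hcond : ¬ (pvEndsSentence l && decide ((((cur ++ [l]).length : Nat) : Int) ≥ spp)) = true := by
        rw [hcast]; exact hc
      have hfc : pvFindCut (l :: rest) spp (cur.length : Int)
          = 1 + pvFindCut rest spp ((cur.length : Int) + 1) := by
        simp only [pvFindCut, hc]
        simp
      simp only [pvFinA, hcond]
      simp only [Bool.false_eq_true, if_false]
      cases rest with
      | nil =>
        have hfc0 : pvFindCut ([] : List String) spp ((cur.length : Int) + 1) = 0 := rfl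
        simp only [pvFinA, hfc, hfc0]
        have hm : min (1 + 0 + 1) ([l] : List String).length = 1 := by simp
        rw [hm]
        simp [pvParasB_nil]
      | cons r rs =>
        rw [ih (cur ++ [l]) (by simp)]
        rw [hcast, hfc]
        have hcut : min (1 + pvFindCut (r :: rs) spp ((cur.length : Int) + 1) + 1) (l :: r :: rs).length
            = (min (pvFindCut (r :: rs) spp ((cur.length : Int) + 1) + 1) (r :: rs).length) + 1 := by
          simp only [List.length_cons]; omega
        rw [hcut]
        simp only [List.take_succ_cons, List.drop_succ_cons]
        simp

-- ===== VERDICT (by name: the statement is the Claim_ definition above) =====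
theorem merge_into_paragraphs_spec : Claim_equal_merge_into_paragraphs := by
  intro lines spp _
  unfold Spec_merge_into_paragraphs merge_into_paragraphs merge_into_paragraphs_alt
  cases lines with
  | nil => simp
  | cons l ls =>
    simp only [if_neg (List.cons_ne_nil l ls)]
    rw [pvFoldA_eq_finA spp (l :: ls) [] []]
    rw [pvFinA_eq_parasB spp (l :: ls) [] (List.cons_ne_nil l ls)]
    rw [pvParasB_cons]
    simp
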